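-- pv_equiv track=rewrite | github.com/StyLishPoor/python-practice | 11.py | CanTile
-- ===== SOURCE A (Python) =====
-- def CanTile(n,missPos):
--     size = 2**n
--     dimlist = []
--     allDiferrent = True
--     #4つの象限が全て異なるかチェック
--     for pos in missPos:
--         dim = 2*(pos[0] >= size//2) + (pos[1] >= size//2)
--         if dim in dimlist:
--             allDiferrent = False
--             break
--         else:
--             dimlist.append(dim)
--     if allDiferrent:
--         return True
--     #3つにトロミノが当てはまるかチェック
--
--     for first in missPos:
--         r_check,c_check = False,False
--         test = missPos[:]
--         test.remove(first)
--         for second in test: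
--             if abs(second[0]-first[0])==1 and second[1] == first[1]:
--                 c_check = True
--                 continue
--             if abs(second[1]-first[1])==1 and second[0] == first[0]:
--                 r_check = True
--                 continue
--         if c_check and r_check:
--             return True
--     return False
-- ===== SOURCE B (Python) =====
-- def CanTile(n, missPos):
--     half = 2**n // 2
--     quads = [2*(r >= half) + (c >= half) for r, c in missPos]
--     if len(set(quads)) == len(quads):
--         return True
--     col2rows = {}
--     row2cols = {}
--     for r, c in missPos:
--         col2rows.setdefault(c, []).append(r)
--         row2cols.setdefault(r, []).append(c)
--     for r, c in missPos:
--         rows = col2rows[c]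
--         cols = row2cols[r]
--         if (r-1 in rows or r+1 in rows) and (c-1 in cols or c+1 in cols):
--             return True
--     return False
-- ===== Notes on version B (the rewrite author's own statement) =====
-- stated objective: alternative
-- what changed: Phase 1 becomes a quadrant-code list compared against its deduplicated length, and phase 2's nested pairwise scan with per-element list copy/remove is replaced by row/column index dictionaries built once, then a single pass testing vertical and horizontal neighbours by dictionary lookup.
import Mathlib
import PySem

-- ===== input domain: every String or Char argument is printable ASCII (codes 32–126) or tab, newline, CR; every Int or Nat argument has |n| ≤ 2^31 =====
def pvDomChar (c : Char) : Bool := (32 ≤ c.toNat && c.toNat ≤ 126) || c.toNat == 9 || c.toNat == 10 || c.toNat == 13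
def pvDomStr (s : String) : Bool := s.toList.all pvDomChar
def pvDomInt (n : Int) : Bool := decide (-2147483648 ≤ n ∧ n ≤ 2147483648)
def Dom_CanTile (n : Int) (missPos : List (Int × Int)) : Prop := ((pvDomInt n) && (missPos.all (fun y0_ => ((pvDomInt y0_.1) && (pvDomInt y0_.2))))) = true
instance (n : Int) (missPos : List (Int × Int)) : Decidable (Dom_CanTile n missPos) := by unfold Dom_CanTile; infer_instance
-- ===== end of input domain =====

-- B replaces A's quadratic pairwise neighbour scan by row/column index dictionaries built once, then a single intersection pass (alternative decomposition).


-- ===== PORT A =====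
-- phase 1: quadrant codes must all be distinct (loop with dimlist accumulator, break on repeat)
def aPhase1 (half : Int) : List (Int × Int) → List Int → Bool
  | [], _ => true
  | p :: rest, dimlist =>
    let dim : Int := 2 * (if p.1 ≥ half then 1 else 0) + (if p.2 ≥ half then 1 else 0)
    if dim ∈ dimlist then false
    else aPhase1 half rest (dimlist ++ [dim])

-- inner loop over test, state (r_check, c_check)
def aInner (first : Int × Int) (test : List (Int × Int)) : Bool × Bool :=
  test.foldl (fun rc s =>
    if (s.1 - first.1).natAbs == 1 && s.2 == first.2 then (rc.1, true)
    else if (s.2 - first.2).natAbs == 1 && s.1 == first.1 then (true, rc.2)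
    else rc) (false, false)

-- phase 2: for first in missPos, test = missPos[:] with one copy of first removed
def aPhase2 (missPos : List (Int × Int)) : List (Int × Int) → Bool
  | [] => false
  | first :: rest =>
    let test := (PySem.List.remove? missPos first).getD []
    let rc := aInner first test
    if rc.2 && rc.1 then true else aPhase2 missPos rest

def CanTile (n : Int) (missPos : List (Int × Int)) : Bool :=
  -- size//2 ported as 2^n.toNat/2: exact also for n < 0, where Python's float 2**n // 2 equals 0.0, as does this
  let half : Int := (2 ^ n.toNat) / 2
  if aPhase1 half missPos [] then true
  else aPhase2 missPos missPos

-- ===== PORT B =====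
def quadOf (half : Int) (p : Int × Int) : Int :=
  2 * (if p.1 ≥ half then 1 else 0) + (if p.2 ≥ half then 1 else 0)

-- one loop filling both index dicts: col2rows (key = column) and row2cols (key = row)
def bGroups (missPos : List (Int × Int)) :
    PySem.Dict Int (List Int) × PySem.Dict Int (List Int) :=
  missPos.foldl (fun ds p =>
      (PySem.Dict.modify ds.1 p.2 [] (fun l => l ++ [p.1]),
       PySem.Dict.modify ds.2 p.1 [] (fun l => l ++ [p.2])))
    (PySem.Dict.empty, PySem.Dict.empty)

def CanTile_alt (n : Int) (missPos : List (Int × Int)) : Bool :=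
  -- 2**n // 2 ported as 2^n.toNat/2: exact also for n < 0 (Python's float value is 0.0 there)
  let half : Int := (2 ^ n.toNat) / 2
  let quads := missPos.map (quadOf half)
  if PySem.Set.len (PySem.Set.ofList quads) == PySem.List.len quads then true
  else
    let ds := bGroups missPos
    missPos.any (fun p =>
      let rows := PySem.Dict.getD ds.1 p.2 []
      let cols := PySem.Dict.getD ds.2 p.1 []
      (rows.contains (p.1 - 1) || rows.contains (p.1 + 1)) &&
      (cols.contains (p.2 - 1) || cols.contains (p.2 + 1)))

-- ===== PRECONDITION & SPEC =====
def Spec_CanTile (n : Int) (missPos : List (Int × Int)) (out : Bool) : Prop := out = CanTile_alt n missPos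
instance (n : Int) (missPos : List (Int × Int)) (out : Bool) : Decidable (Spec_CanTile n missPos out) := by unfold Spec_CanTile; infer_instance

-- ===== CLAIM (what is proved, stated in full; the proofs are below) =====
def Claim_equal_CanTile : Prop := ∀ (n : Int) (missPos : List (Int × Int)), Dom_CanTile n missPos → Spec_CanTile n missPos (CanTile n missPos)

-- ===== LEMMAS AND PROOFS =====

-- Bool predicates "p has a vertical / horizontal neighbour in l"
def vertP (l : List (Int × Int)) (p : Int × Int) : Bool :=
  l.any (fun q => (q.1 - p.1).natAbs == 1 && q.2 == p.2)
def horizP (l : List (Int × Int)) (p : Int × Int) : Bool :=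
  l.any (fun q => (q.2 - p.2).natAbs == 1 && q.1 == p.1)

lemma aPhase1_iff (half : Int) (l : List (Int × Int)) (acc : List Int) :
    aPhase1 half l acc = true ↔
      (l.map (quadOf half)).Nodup ∧ ∀ d ∈ l.map (quadOf half), d ∉ acc := by
  induction l generalizing acc with
  | nil => simp [aPhase1]
  | cons p rest ih =>
    have hq : (2 * (if p.1 ≥ half then (1:Int) else 0) + (if p.2 ≥ half then 1 else 0))
        = quadOf half p := rfl
    simp only [aPhase1, hq, List.map_cons, List.nodup_cons]
    by_cases h : quadOf half p ∈ acc
    · rw [if_pos h]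
      constructor
      · intro hf; cases hf
      · rintro ⟨_, hall⟩
        exact absurd h (hall _ (List.mem_cons_self))
    · rw [if_neg h, ih]
      constructor
      · rintro ⟨hnd, hall⟩
        refine ⟨⟨fun hm => (hall _ hm) (List.mem_append_right _ (List.mem_singleton.mpr rfl)), hnd⟩,
          fun d hd => ?_⟩
        rcases List.mem_cons.mp hd with rfl | hd
        · exact h
        · intro hin; exact (hall _ hd) (List.mem_append_left _ hin)
      · rintro ⟨⟨hnm, hnd⟩, hall⟩
        refine ⟨hnd, fun d hd hin => ?_⟩
        rcases List.mem_append.mp hin with hin | hin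
        · exact (hall _ (List.mem_cons_of_mem _ hd)) hin
        · rw [List.mem_singleton] at hin; subst hin; exact hnm hd

lemma ofList_sublist (xs : List Int) : (PySem.Set.ofList xs).Sublist xs := by
  induction xs using List.reverseRecOn with
  | nil => simp [PySem.Set.ofList_nil]
  | append_singleton xs x ih =>
    rw [PySem.Set.ofList_append_singleton]
    unfold PySem.Set.add
    by_cases h : PySem.Set.contains (PySem.Set.ofList xs) x = true
    · rw [if_pos h]
      exact ih.trans (List.sublist_append_left xs [x])
    · rw [if_neg h]
      exact List.Sublist.append ih (List.Sublist.refl [x])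

lemma ofList_len_iff (xs : List Int) :
    (PySem.Set.ofList xs).length = xs.length ↔ xs.Nodup := by
  constructor
  · intro h
    have he := (ofList_sublist xs).eq_of_length h
    rw [← he]
    exact PySem.Set.nodup_ofList xs
  · intro h
    rw [PySem.Set.ofList_eq_self_of_nodup xs h]

lemma bLenCond_iff (q : List Int) :
    (PySem.Set.len (PySem.Set.ofList q) == PySem.List.len q) = true ↔ q.Nodup := by
  have h : (PySem.Set.len (PySem.Set.ofList q) == PySem.List.len q) = true ↔
      (PySem.Set.ofList q).length = q.length := by
    simp [PySem.Set.len, PySem.List.len_eq]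
  rw [h, ofList_len_iff]

-- proof-side name for A's inner-loop step (definitionally the lambda in aInner)
def aStep (first : Int × Int) (rc : Bool × Bool) (s : Int × Int) : Bool × Bool :=
  if (s.1 - first.1).natAbs == 1 && s.2 == first.2 then (rc.1, true)
  else if (s.2 - first.2).natAbs == 1 && s.1 == first.1 then (true, rc.2)
  else rc

lemma aStep_foldl (first : Int × Int) (test : List (Int × Int)) : ∀ (a b : Bool),
    test.foldl (aStep first) (a, b)
      = (a || test.any (fun q => (q.2 - first.2).natAbs == 1 && q.1 == first.1),
         b || test.any (fun q => (q.1 - first.1).natAbs == 1 && q.2 == first.2)) := by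
  induction test with
  | nil => intro a b; simp
  | cons s rest ih =>
    intro a b
    rw [List.foldl_cons]
    by_cases h1 : ((s.1 - first.1).natAbs == 1 && s.2 == first.2) = true
    · have h2 : ((s.2 - first.2).natAbs == 1 && s.1 == first.1) = false := by
        simp only [Bool.and_eq_true, beq_iff_eq] at h1
        simp only [Bool.and_eq_false_iff, beq_eq_false_iff_ne, ne_eq]
        right
        intro he
        rw [he] at h1
        simp at h1
      rw [show aStep first (a, b) s = (a, true) from by simp [aStep, h1], ih]
      simp [List.any_cons, h1, h2]
    · have h1f : ((s.1 - first.1).natAbs == 1 && s.2 == first.2) = false := by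
        simpa using h1
      by_cases h2 : ((s.2 - first.2).natAbs == 1 && s.1 == first.1) = true
      · rw [show aStep first (a, b) s = (true, b) from by simp [aStep, h1f, h2], ih]
        simp [List.any_cons, h1f, h2]
      · have h2f : ((s.2 - first.2).natAbs == 1 && s.1 == first.1) = false := by
          simpa using h2
        rw [show aStep first (a, b) s = (a, b) from by simp [aStep, h1f, h2f], ih]
        simp [List.any_cons, h1f, h2f]

lemma aInner_eq (first : Int × Int) (test : List (Int × Int)) :
    aInner first test = (horizP test first, vertP test first) := by
  have h : aInner first test = test.foldl (aStep first) (false, false) := rfl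
  rw [h, aStep_foldl]
  simp [horizP, vertP]

lemma any_erase (l : List (Int × Int)) (x : Int × Int) (f : Int × Int → Bool)
    (hx : x ∈ l) (hf : f x = false) : (l.erase x).any f = l.any f := by
  have hperm : l.Perm (x :: l.erase x) := List.perm_cons_erase hx
  have h2 : l.any f = (x :: l.erase x).any f := hperm.any_eq
  rw [h2, List.any_cons, hf, Bool.false_or]

lemma aInner_remove (l : List (Int × Int)) (first : Int × Int) (h : first ∈ l) :
    aInner first ((PySem.List.remove? l first).getD []) = (horizP l first, vertP l first) := by
  rw [PySem.List.remove?_eq_some_erase l first h]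
  simp only [Option.getD_some]
  rw [aInner_eq]
  unfold horizP vertP
  rw [any_erase l first _ h (by simp), any_erase l first _ h (by simp)]

lemma aPhase2_eq (l : List (Int × Int)) :
    ∀ rest, (∀ p ∈ rest, p ∈ l) →
      aPhase2 l rest = rest.any (fun p => vertP l p && horizP l p) := by
  intro rest
  induction rest with
  | nil => intro _; simp [aPhase2]
  | cons first rest ih =>
    intro hsub
    have hf : first ∈ l := hsub first (List.mem_cons_self)
    simp only [aPhase2, aInner_remove l first hf]
    show (if (vertP l first && horizP l first) = true then true else aPhase2 l rest) = _
    rw [List.any_cons]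
    by_cases hv : (vertP l first && horizP l first) = true
    · rw [if_pos hv, hv, Bool.true_or]
    · have hvf : (vertP l first && horizP l first) = false := by simpa using hv
      rw [if_neg hv, hvf, Bool.false_or]
      exact ih (fun p hp => hsub p (List.mem_cons_of_mem _ hp))

lemma bGroups_fst (l : List (Int × Int)) (c : Int) :
    PySem.Dict.getD (bGroups l).1 c [] = (l.filter (fun p => p.2 == c)).map (fun p => p.1) := by
  unfold bGroups
  rw [PySem.List.foldl_prod_mk
    (f := fun d (p : Int × Int) => PySem.Dict.modify d p.2 [] (fun v => v ++ [p.1]))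
    (g := fun d (p : Int × Int) => PySem.Dict.modify d p.1 [] (fun v => v ++ [p.2]))]
  have h : l.foldl (fun d (p : Int × Int) => PySem.Dict.modify d p.2 [] (fun v => v ++ [p.1])) PySem.Dict.empty
      = (l.map (fun p => (p.2, p.1))).foldl (fun d (q : Int × Int) => PySem.Dict.modify d q.1 [] (fun v => v ++ [q.2])) PySem.Dict.empty := by
    rw [List.foldl_map]
  rw [h, PySem.Dict.getD_foldl_modify_append]
  simp [List.filter_map, Function.comp_def, List.map_map]

lemma bGroups_snd (l : List (Int × Int)) (r : Int) :
    PySem.Dict.getD (bGroups l).2 r [] = (l.filter (fun p => p.1 == r)).map (fun p => p.2) := by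
  unfold bGroups
  rw [PySem.List.foldl_prod_mk
    (f := fun d (p : Int × Int) => PySem.Dict.modify d p.2 [] (fun v => v ++ [p.1]))
    (g := fun d (p : Int × Int) => PySem.Dict.modify d p.1 [] (fun v => v ++ [p.2]))]
  rw [PySem.Dict.getD_foldl_modify_append]
  simp

lemma rows_contains_iff (l : List (Int × Int)) (p : Int × Int) :
    (((l.filter (fun q => q.2 == p.2)).map (fun q => q.1)).contains (p.1 - 1)
      || ((l.filter (fun q => q.2 == p.2)).map (fun q => q.1)).contains (p.1 + 1)) = vertP l p := by
  rw [Bool.eq_iff_iff]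
  unfold vertP
  simp only [Bool.or_eq_true, List.contains_iff_mem, List.mem_map, List.mem_filter,
    List.any_eq_true, Bool.and_eq_true, beq_iff_eq]
  constructor
  · rintro (⟨q, ⟨hq, hc⟩, hv⟩ | ⟨q, ⟨hq, hc⟩, hv⟩) <;> exact ⟨q, hq, by omega, hc⟩
  · rintro ⟨q, hq, hn, hc⟩
    have hor : q.1 = p.1 - 1 ∨ q.1 = p.1 + 1 := by omega
    rcases hor with h | h
    · exact Or.inl ⟨q, ⟨hq, hc⟩, h⟩
    · exact Or.inr ⟨q, ⟨hq, hc⟩, h⟩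

lemma cols_contains_iff (l : List (Int × Int)) (p : Int × Int) :
    (((l.filter (fun q => q.1 == p.1)).map (fun q => q.2)).contains (p.2 - 1)
      || ((l.filter (fun q => q.1 == p.1)).map (fun q => q.2)).contains (p.2 + 1)) = horizP l p := by
  rw [Bool.eq_iff_iff]
  unfold horizP
  simp only [Bool.or_eq_true, List.contains_iff_mem, List.mem_map, List.mem_filter,
    List.any_eq_true, Bool.and_eq_true, beq_iff_eq]
  constructor
  · rintro (⟨q, ⟨hq, hc⟩, hv⟩ | ⟨q, ⟨hq, hc⟩, hv⟩) <;> exact ⟨q, hq, by omega, hc⟩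
  · rintro ⟨q, hq, hn, hc⟩
    have hor : q.2 = p.2 - 1 ∨ q.2 = p.2 + 1 := by omega
    rcases hor with h | h
    · exact Or.inl ⟨q, ⟨hq, hc⟩, h⟩
    · exact Or.inr ⟨q, ⟨hq, hc⟩, h⟩

-- ===== VERDICT (by name: the statement is the Claim_ definition above) =====
theorem CanTile_spec : Claim_equal_CanTile := by
  intro n l _
  unfold Spec_CanTile
  show CanTile n l = CanTile_alt n l
  simp only [CanTile, CanTile_alt]
  by_cases hd : (l.map (quadOf ((2 ^ n.toNat) / 2))).Nodup
  · rw [if_pos ((aPhase1_iff _ l []).mpr ⟨hd, by simp⟩), if_pos ((bLenCond_iff _).mpr hd)]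
  · rw [if_neg (fun h => hd ((aPhase1_iff _ l []).mp h).1),
        if_neg (fun h => hd ((bLenCond_iff _).mp h))]
    rw [aPhase2_eq l l (fun p hp => hp)]
    exact PySem.List.any_congr_mem (fun p _ => by
      simp only [bGroups_fst, bGroups_snd, rows_contains_iff, cols_contains_iff])
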